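-- pv_equiv track=rewrite | github.com/OaraDragos/University | FP/a1-py/p1.py | smallestNum
-- ===== SOURCE A (Python) =====
-- def smallestNum(n:int) -> int:
--     if n < 10:
--         return n
--
--     a = [0] * 10
--     while n > 0:
--         a[n % 10] += 1
--         n //= 10
--     m=0
--     for i in range (1,10):
--        while a[i]>0:
--         m = m * 10 + i
--         a[i]=a[i]-1
--     return m
-- ===== SOURCE B (Python) =====
-- def smallestNum(n: int) -> int:
--     if n < 10:
--         return n
--     ds = []
--     while n > 0:
--         d = n % 10
--         if d:
--             ds.append(d)
--         n //= 10
--     m = 0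
--     for d in sorted(ds):
--         m = m * 10 + d
--     return m
-- ===== Notes on version B (the rewrite author's own statement) =====
-- stated objective: alternative
-- what changed: Replaces the fixed per-digit counting-bucket array and its nested emit loops with an explicit list of nonzero digits that is comparison-sorted and folded once into the result.
import Mathlib
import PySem

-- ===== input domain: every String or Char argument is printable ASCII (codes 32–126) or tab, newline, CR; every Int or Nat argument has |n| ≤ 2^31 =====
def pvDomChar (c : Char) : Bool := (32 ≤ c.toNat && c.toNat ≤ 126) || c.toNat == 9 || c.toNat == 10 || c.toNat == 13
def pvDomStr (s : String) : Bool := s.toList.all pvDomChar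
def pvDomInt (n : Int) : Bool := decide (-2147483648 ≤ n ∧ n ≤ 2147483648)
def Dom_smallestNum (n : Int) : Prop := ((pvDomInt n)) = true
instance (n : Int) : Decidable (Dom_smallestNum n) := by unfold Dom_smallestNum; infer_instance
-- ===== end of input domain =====

-- B replaces A's per-digit counting-bucket array and nested emit loops by an explicit
-- nonzero-digit list that is comparison-sorted and folded once (alternative algorithm).

-- termination helper used by the ports' digit-extraction recursions
theorem pvFloordivTen_lt (n : Int) (h : 0 < n) :
    (PySem.Int.floordiv n 10).toNat < n.toNat := by
  rw [PySem.Int.floordiv_eq_ediv_of_pos (by norm_num)]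
  omega

-- ===== PORT A =====
-- while n > 0: a[n % 10] += 1; n //= 10
def smallestNumCount (n : Int) (a : List Int) : List Int :=
  if h : 0 < n then
    smallestNumCount (PySem.Int.floordiv n 10)
      (a.set (PySem.Int.mod n 10).toNat (a.getD (PySem.Int.mod n 10).toNat 0 + 1))
  else a
termination_by n.toNat
decreasing_by exact pvFloordivTen_lt n h

-- while a[i] > 0: m = m * 10 + i; a[i] = a[i] - 1   (m-part; c is a[i])
def smallestNumInner (m i c : Int) : Int :=
  if h : 0 < c then smallestNumInner (m * 10 + i) i (c - 1) else m
termination_by c.toNat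
decreasing_by omega

def smallestNum (n : Int) : Int :=
  if n < 10 then n
  else
    let a := smallestNumCount n (List.replicate 10 0)
    (PySem.List.pyRange 1 10 1).foldl (fun m i => smallestNumInner m i (a.getD i.toNat 0)) 0

-- ===== PORT B =====
-- while n > 0: d = n % 10; if d: ds.append(d); n //= 10
def smallestNumAltDigits (n : Int) (ds : List Int) : List Int :=
  if h : 0 < n then
    smallestNumAltDigits (PySem.Int.floordiv n 10)
      (if PySem.Int.mod n 10 ≠ 0 then ds ++ [PySem.Int.mod n 10] else ds)
  else ds
termination_by n.toNat
decreasing_by exact pvFloordivTen_lt n h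

def smallestNum_alt (n : Int) : Int :=
  if n < 10 then n
  else (PySem.List.sorted (smallestNumAltDigits n []) (fun x => x) false).foldl
        (fun m d => m * 10 + d) 0

-- ===== PRECONDITION & SPEC =====
def Spec_smallestNum (n : Int) (out : Int) : Prop := out = smallestNum_alt n
instance (n : Int) (out : Int) : Decidable (Spec_smallestNum n out) := by unfold Spec_smallestNum; infer_instance

-- ===== CLAIM (what is proved, stated in full; the proofs are below) =====
def Claim_equal_smallestNum : Prop := ∀ (n : Int), Dom_smallestNum n → Spec_smallestNum n (smallestNum n)

-- ===== LEMMAS AND PROOFS =====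

-- ghost digit stream of n (least significant first), used only in the proofs
def pvDigs (n : Int) : List Int :=
  if h : 0 < n then PySem.Int.mod n 10 :: pvDigs (PySem.Int.floordiv n 10) else []
termination_by n.toNat
decreasing_by exact pvFloordivTen_lt n h

theorem pvDigs_mem (n : Int) : ∀ d ∈ pvDigs n, 0 ≤ d ∧ d < 10 := by
  induction n using pvDigs.induct with
  | case1 n h ih =>
    rw [pvDigs, dif_pos h]
    intro d hd
    rcases List.mem_cons.mp hd with h1 | h1
    · subst h1
      exact ⟨PySem.Int.mod_nonneg _ (by norm_num), PySem.Int.mod_lt _ (by norm_num)⟩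
    · exact ih d h1
  | case2 n h => rw [pvDigs, dif_neg h]; intro d hd; cases hd

theorem altDigits_eq (n : Int) : ∀ ds, smallestNumAltDigits n ds = ds ++ (pvDigs n).filter (fun d => d != 0) := by
  induction n using pvDigs.induct with
  | case1 n h ih =>
    intro ds
    rw [smallestNumAltDigits, dif_pos h, pvDigs, dif_pos h, ih]
    by_cases hd : PySem.Int.mod n 10 = 0
    · rw [if_neg (not_not_intro hd), List.filter_cons]
      have hb : (PySem.Int.mod n 10 != 0) = false := by simp only [hd, bne_self_eq_false]
      rw [hb]
      simp
    · rw [if_pos hd, List.filter_cons]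
      have hb : (PySem.Int.mod n 10 != 0) = true := by simp only [bne_iff_ne, ne_eq]; exact hd
      rw [hb]
      simp
  | case2 n h =>
    intro ds
    rw [smallestNumAltDigits, dif_neg h, pvDigs, dif_neg h]
    simp

theorem count_smallestNumCount (n : Int) : ∀ (a : List Int), a.length = 10 →
    ∀ j : Nat, j < 10 →
      (smallestNumCount n a).getD j 0 = a.getD j 0 + ((pvDigs n).count (j : Int) : Int) := by
  induction n using pvDigs.induct with
  | case1 n h ih =>
    intro a ha j hj
    have hmE : PySem.Int.mod n 10 = n % 10 := PySem.Int.mod_eq_emod_of_pos (by norm_num)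
    have hk0 : 0 ≤ PySem.Int.mod n 10 := by omega
    have hk10 : PySem.Int.mod n 10 < 10 := by omega
    have hklt : (PySem.Int.mod n 10).toNat < 10 := by omega
    rw [smallestNumCount, dif_pos h, pvDigs, dif_pos h]
    rw [ih _ (by simp [ha]) j hj]
    rw [List.count_cons]
    by_cases hjeq : j = (PySem.Int.mod n 10).toNat
    · have hb : (PySem.Int.mod n 10 == (j : Int)) = true := by
        simp only [beq_iff_eq]; omega
      rw [hb]
      have hset : (a.set (PySem.Int.mod n 10).toNat
            (a.getD (PySem.Int.mod n 10).toNat 0 + 1)).getD j 0 = a.getD j 0 + 1 := by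
        subst hjeq
        rw [List.getD, List.getElem?_set, if_pos rfl, if_pos (by omega)]
        rfl
      rw [hset]
      simp only [if_true]
      push_cast
      ring
    · have hb : (PySem.Int.mod n 10 == (j : Int)) = false := by
        simp only [beq_eq_false_iff_ne, ne_eq]; omega
      rw [hb]
      have hset : (a.set (PySem.Int.mod n 10).toNat
            (a.getD (PySem.Int.mod n 10).toNat 0 + 1)).getD j 0 = a.getD j 0 := by
        rw [List.getD, List.getElem?_set, if_neg (by omega)]
        rfl
      rw [hset]
      simp
  | case2 n h =>
    intro a ha j hj
    rw [smallestNumCount, dif_neg h, pvDigs, dif_neg h]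
    simp

theorem inner_eq_replicate_aux : ∀ (k : Nat) (c : Int), c.toNat = k → ∀ m i : Int,
    smallestNumInner m i c = (List.replicate k i).foldl (fun m d => m * 10 + d) m := by
  intro k
  induction k with
  | zero =>
    intro c hc m i
    rw [smallestNumInner, dif_neg (by omega)]
    simp
  | succ k ih =>
    intro c hc m i
    rw [smallestNumInner, dif_pos (by omega)]
    rw [List.replicate_succ, List.foldl_cons]
    exact ih (c - 1) (by omega) _ _

theorem inner_eq_replicate (c : Int) (m i : Int) :
    smallestNumInner m i c = (List.replicate c.toNat i).foldl (fun m d => m * 10 + d) m :=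
  inner_eq_replicate_aux c.toNat c rfl m i

theorem foldl_foldl_flatMap (g : Int → Int → Int) (f : Int → List Int) :
    ∀ (l : List Int) (m : Int),
    l.foldl (fun m i => (f i).foldl g m) m = (l.flatMap f).foldl g m := by
  intro l
  induction l with
  | nil => simp
  | cons x xs ih => intro m; simp [List.flatMap_cons, List.foldl_append, ih]

theorem count_flatMap_replicate (c : Int → Nat) :
    ∀ (l : List Int), l.Nodup → ∀ j : Int,
    (l.flatMap fun i => List.replicate (c i) i).count j = if j ∈ l then c j else 0 := by
  intro l
  induction l with
  | nil => simp
  | cons x xs ih =>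
    intro hnd j
    have hnd' := (List.nodup_cons.mp hnd)
    rw [List.flatMap_cons, List.count_append, List.count_replicate, ih hnd'.2 j]
    by_cases hjx : j = x
    · subst hjx
      simp [hnd'.1]
    · simp [hjx, Ne.symm hjx]

theorem pairwise_flatMap_replicate (c : Int → Nat) :
    ∀ (l : List Int), l.Pairwise (· ≤ ·) →
    (l.flatMap fun i => List.replicate (c i) i).Pairwise (· ≤ ·) := by
  intro l
  induction l with
  | nil => simp
  | cons x xs ih =>
    intro hp
    rw [List.flatMap_cons, List.pairwise_append]
    refine ⟨by simp [List.pairwise_replicate], ih (List.Pairwise.of_cons hp), ?_⟩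
    intro a ha b hb
    have hax : a = x := (List.eq_of_mem_replicate ha)
    obtain ⟨i, hi, hbi⟩ := List.mem_flatMap.mp hb
    have hbi' : b = i := List.eq_of_mem_replicate hbi
    subst hax; subst hbi'
    exact (List.pairwise_cons.mp hp).1 b hi

theorem getD_replicate_zero (k : Nat) : (List.replicate 10 (0 : Int)).getD k 0 = 0 := by
  rw [List.getD, List.getElem?_replicate]
  by_cases hk : k < 10 <;> simp [hk]

-- the common normal form for n ≥ 10
theorem main_eq (n : Int) (h : ¬ n < 10) : smallestNum n = smallestNum_alt n := by
  have hn : 0 < n := by omega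
  set c : Int → Nat := fun i => (pvDigs n).count i with hc
  set L : List Int := (PySem.List.pyRange 1 10 1).flatMap (fun i => List.replicate (c i) i) with hL
  -- A side
  have hA : smallestNum n = L.foldl (fun m d => m * 10 + d) 0 := by
    rw [smallestNum, if_neg h]
    have hcnt : ∀ i ∈ PySem.List.pyRange 1 10 1,
        (smallestNumCount n (List.replicate 10 0)).getD i.toNat 0 = (c i : Int) := by
      intro i hi
      have hi' := (PySem.List.mem_pyRange_one.mp hi)
      have hjt : i.toNat < 10 := by omega
      rw [count_smallestNumCount n _ (by simp) i.toNat hjt, getD_replicate_zero]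
      have : ((i.toNat : Int)) = i := by omega
      rw [this]
      simp [hc]
    have : (PySem.List.pyRange 1 10 1).foldl
        (fun m i => smallestNumInner m i ((smallestNumCount n (List.replicate 10 0)).getD i.toNat 0)) 0
        = (PySem.List.pyRange 1 10 1).foldl
        (fun m i => (List.replicate (c i) i).foldl (fun m d => m * 10 + d) m) 0 := by
      apply PySem.List.foldl_congr_mem
      intro m i hi
      rw [hcnt i hi, inner_eq_replicate]
      simp [hc]
    rw [this, foldl_foldl_flatMap]
  -- B side
  have hperm : L.Perm ((pvDigs n).filter (fun d => d != 0)) := by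
    rw [List.perm_iff_count]
    intro j
    rw [count_flatMap_replicate c _ (PySem.List.nodup_pyRange_one 1 10) j]
    by_cases hj : j ∈ PySem.List.pyRange 1 10 1
    · have hj' := PySem.List.mem_pyRange_one.mp hj
      have hjne : ((j != 0) = true) := by simp only [bne_iff_ne, ne_eq]; omega
      rw [if_pos hj, List.count_filter (p := fun d => d != 0) (a := j) hjne]
    · rw [if_neg hj]
      have hj0 : j < 1 ∨ 10 ≤ j := by
        by_contra hcon
        exact hj (PySem.List.mem_pyRange_one.mpr (by omega))
      symm
      rw [List.count_eq_zero]
      intro hmem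
      have hmem' := List.mem_filter.mp hmem
      have h1 := pvDigs_mem n j hmem'.1
      have h2 : j ≠ 0 := by simpa using hmem'.2
      omega
  have hsorted : PySem.List.sorted ((pvDigs n).filter (fun d => d != 0)) (fun x => x) false = L := by
    exact PySem.List.sorted_id_eq_of_perm_of_pairwise _ _ hperm
      (pairwise_flatMap_replicate c _
        ((PySem.List.pairwise_lt_pyRange_one 1 10).imp (fun h => le_of_lt h)))
  rw [hA, smallestNum_alt, if_neg h, altDigits_eq n [], List.nil_append, hsorted]

-- ===== VERDICT (by name: the statement is the Claim_ definition above) =====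
theorem smallestNum_spec : Claim_equal_smallestNum := by
  intro n _
  unfold Spec_smallestNum
  by_cases h : n < 10
  · rw [smallestNum, if_pos h, smallestNum_alt, if_pos h]
  · exact main_eq n h
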